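-- pv_equiv track=rewrite | github.com/AlphaCloudX/Word-Search-Script | Methods.py | methodTwo
-- ===== SOURCE A (Python) =====
-- def stringify(diag):
--     text = ""
--     # Turning indices into 1 whole string
--     for y in range(len(diag)):
--         text = text + diag[y]
--
--     return text
--
-- def methodTwo(array):
--     board = []
--     positions = []
--     # For top Left to Bottom Right | Bottom Half
--     for x in range(len(array)):
--         diag = stringify([array[x + i][i] for i, row in enumerate(array) if 0 <= i + x < len(array)])
--         board.append(diag)
--
--         position = [(i+1, x + i+1) for i, row in enumerate(array) if 0 <= i + x < len(array)]
--         positions.append(position)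
--
--     return board, positions
-- ===== SOURCE B (Python) =====
-- def methodTwo(array):
--     # One pass over the grid: bucket each cell by its diagonal index k = r - c,
--     # instead of re-scanning the whole grid once per diagonal.
--     n = len(array)
--     chars = [[] for _ in range(n)]
--     pos = [[] for _ in range(n)]
--     for r, row in enumerate(array):
--         for c, ch in enumerate(row):
--             k = r - c
--             if k >= 0:
--                 chars[k].append(ch)
--                 pos[k].append((c + 1, r + 1))
--     return ["".join(cs) for cs in chars], pos
-- ===== Notes on version B (the rewrite author's own statement) =====
-- stated objective: alternative
-- what changed: B makes a single pass over the grid cells and buckets each cell by its diagonal index k = r - c, instead of A's re-scan of all rows (with an index filter) once per diagonal; the joined strings and position lists are then read off the buckets.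
import Mathlib
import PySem

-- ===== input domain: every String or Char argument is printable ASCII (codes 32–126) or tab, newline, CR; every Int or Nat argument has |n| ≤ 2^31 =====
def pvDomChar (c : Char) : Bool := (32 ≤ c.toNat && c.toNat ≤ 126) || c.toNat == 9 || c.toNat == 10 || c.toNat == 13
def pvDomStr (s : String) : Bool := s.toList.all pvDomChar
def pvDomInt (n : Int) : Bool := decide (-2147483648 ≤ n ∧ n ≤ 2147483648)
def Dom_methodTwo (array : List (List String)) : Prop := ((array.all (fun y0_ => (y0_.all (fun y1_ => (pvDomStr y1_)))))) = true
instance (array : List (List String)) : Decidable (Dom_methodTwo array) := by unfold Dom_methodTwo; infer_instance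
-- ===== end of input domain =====

-- B replaces A's per-diagonal re-scan of the whole grid by a single pass over the cells
-- that buckets each cell by its diagonal index r - c (objective: alternative decomposition).

-- ===== PORT A =====
-- string concatenation is modelled on List Char (Lean's String.append is kernel-opaque); exact
def stringify (diag : List String) : String :=
  String.ofList
    ((PySem.List.pyRange 0 diag.length 1).foldl
      (fun text y => text ++ (PySem.List.pyGetD diag y "").toList) [])

def methodTwo (array : List (List String)) : List String × (List (List (Int × Int))) :=
  (PySem.List.pyRange 0 array.length 1).foldl
    (fun (st : List String × List (List (Int × Int))) x =>
      (st.1 ++ [stringify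
        ((PySem.List.enumerate array 0).foldl (fun acc p =>
          if 0 ≤ p.1 + x ∧ p.1 + x < (array.length : Int) then
            -- array[x + i][i]; in range on every input A accepts (Pre_)
            acc ++ [PySem.List.pyGetD (PySem.List.pyGetD array (x + p.1) []) p.1 ""]
          else acc) [])],
       st.2 ++ [(PySem.List.enumerate array 0).foldl (fun acc p =>
          if 0 ≤ p.1 + x ∧ p.1 + x < (array.length : Int) then
            acc ++ [((p.1 + 1 : Int), (x + p.1 + 1 : Int))]
          else acc) []]))
    ([], [])

-- ===== PORT B =====
-- chars[k].append(v) on the bucket list (the index k is in range whenever the Python append runs)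
def pvBump {β : Type} (B : List (List β)) (k : Int) (v : β) : List (List β) :=
  B.set k.toNat ((B.getD k.toNat []) ++ [v])

def methodTwo_alt (array : List (List String)) : List String × (List (List (Int × Int))) :=
  let st :=
    (PySem.List.enumerate array 0).foldl (fun st p =>
      (PySem.List.enumerate p.2 0).foldl
        (fun (st : List (List String) × List (List (Int × Int))) q =>
          if 0 ≤ p.1 - q.1 then
            (pvBump st.1 (p.1 - q.1) q.2, pvBump st.2 (p.1 - q.1) (q.1 + 1, p.1 + 1))
          else st) st)
      (List.replicate array.length [], List.replicate array.length [])
  (st.1.map (fun cs => PySem.Str.join "" cs), st.2)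

-- ===== PRECONDITION & SPEC =====
-- Pre_ excludes exactly the inputs on which A raises IndexError: some row i of length ≤ i,
-- which makes array[x + i][i] out of range for some diagonal.
def Pre_methodTwo (array : List (List String)) : Prop :=
  ∀ i < array.length, i < (array.getD i []).length
instance (array : List (List String)) : Decidable (Pre_methodTwo array) := by
  unfold Pre_methodTwo; infer_instance
def pvWitness_methodTwo : List (List String) := [["a", "b"], ["c", "d"]]

def Spec_methodTwo (array : List (List String)) (out : List String × (List (List (Int × Int)))) : Prop := out = methodTwo_alt array
instance (array : List (List String)) (out : List String × (List (List (Int × Int)))) : Decidable (Spec_methodTwo array out) := by unfold Spec_methodTwo; infer_instance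

-- ===== CLAIM (what is proved, stated in full; the proofs are below) =====
def Claim_equal_methodTwo : Prop := ∀ (array : List (List String)), Dom_methodTwo array → Pre_methodTwo array → Spec_methodTwo array (methodTwo array)

-- ===== LEMMAS AND PROOFS =====

-- the cell value A reads / B buckets, with total indexing
def pvCell (array : List (List String)) (r c : Nat) : String :=
  (array.getD r []).getD c ""

-- contributions of the rows `rows` (whose first row has absolute index r) to diagonal j
def pvDiags {β : Type} (v : Nat → Nat → String → β) (j : Nat) :
    List (List String) → Nat → List β
  | [], _ => []
  | row :: rest, r =>
      (if j ≤ r ∧ r - j < row.length then [v r (r - j) (row.getD (r - j) "")] else [])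
        ++ pvDiags v j rest (r + 1)

-- ---- B side: characterise the bucket folds ----

theorem pv_inner_len {β : Type} (u : Int → String → β) (r : Int) (row : List String) :
    ∀ (c0 : Int) (B : List (List β)),
    ((PySem.List.enumerate row c0).foldl
      (fun B q => if 0 ≤ r - q.1 then pvBump B (r - q.1) (u q.1 q.2) else B) B).length
      = B.length := by
  induction row with
  | nil => intro c0 B; simp [PySem.List.enumerate_nil]
  | cons hd tl ih =>
      intro c0 B
      rw [PySem.List.enumerate_cons, List.foldl_cons, ih]
      split <;> simp [pvBump]

theorem pv_inner {β : Type} (u : Int → String → β) (r : Nat) (row : List String) :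
    ∀ (c0 : Nat) (B : List (List β)) (j : Nat), j < B.length →
    ((PySem.List.enumerate row (c0 : Int)).foldl
      (fun B q => if 0 ≤ (r : Int) - q.1 then pvBump B ((r : Int) - q.1) (u q.1 q.2) else B) B).getD j []
    = B.getD j [] ++
      (if c0 + j ≤ r ∧ r - c0 - j < row.length then [u ((r : Int) - j) (row.getD (r - j - c0) "")] else []) := by
  induction row with
  | nil =>
      intro c0 B j hj
      simp [PySem.List.enumerate_nil]
  | cons hd tl ih =>
      intro c0 B j hj
      rw [PySem.List.enumerate_cons, List.foldl_cons]
      have hcast : (c0 : Int) + 1 = ((c0 + 1 : Nat) : Int) := by push_cast; ring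
      rw [hcast]
      by_cases hhit : c0 ≤ r ∧ r - c0 = j
      · -- the head cell lands in bucket j
        have hg : (0 : Int) ≤ (r : Int) - (c0 : Int) := by omega
        rw [if_pos hg]
        rw [ih (c0 + 1) _ j (by simp [pvBump, hj])]
        have hb : (pvBump B ((r : Int) - (c0 : Int)) (u (c0 : Int) hd)).getD j []
            = B.getD j [] ++ [u ((c0 : Int)) hd] := by
          have ht : ((r : Int) - (c0 : Int)).toNat = j := by omega
          simp [pvBump, ht, List.getD_eq_getElem?_getD, hj]
        rw [hb]
        have hc2 : c0 + j ≤ r ∧ r - c0 - j < (hd :: tl).length := by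
          constructor
          · omega
          · simp; omega
        rw [if_neg (by omega), if_pos hc2]
        have hidx : r - j - c0 = 0 := by omega
        have harg : ((c0 : Int)) = (r : Int) - (j : Int) := by omega
        simp [hidx, ← harg]
      · -- the head cell misses bucket j (wrong bucket or negative diagonal)
        rw [ih (c0 + 1) _ j ?hlen]
        case hlen =>
          split <;> simp [pvBump, hj]
        have hb : (if (0 : Int) ≤ (r : Int) - (c0 : Int) then
              pvBump B ((r : Int) - (c0 : Int)) (u (c0 : Int) hd) else B).getD j []
            = B.getD j [] := by
          split
          · rename_i hg
            have hne : r - c0 ≠ j := by omega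
            have hne' : ((r : Int) - (c0 : Int)).toNat ≠ j := by omega
            simp [pvBump, List.getD_eq_getElem?_getD, hne]
          · rfl
        rw [hb]
        by_cases hc : c0 + j ≤ r ∧ r - c0 - j < (hd :: tl).length
        · have hc' : c0 + 1 + j ≤ r ∧ r - (c0 + 1) - j < tl.length := by
            rcases hc with ⟨h1, h2⟩
            simp at h2
            constructor <;> omega
          rw [if_pos hc', if_pos hc]
          have : r - j - c0 = (r - j - (c0 + 1)) + 1 := by omega
          simp [this]
        · have hc' : ¬ (c0 + 1 + j ≤ r ∧ r - (c0 + 1) - j < tl.length) := by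
            intro ⟨h1, h2⟩
            exact hc ⟨by omega, by simp; omega⟩
          rw [if_neg hc', if_neg hc]

theorem pv_outer_len {β : Type} (w : Int → Int → String → β) (rows : List (List String)) :
    ∀ (r0 : Int) (B : List (List β)),
    ((PySem.List.enumerate rows r0).foldl
      (fun B p => (PySem.List.enumerate p.2 (0 : Int)).foldl
        (fun B q => if 0 ≤ p.1 - q.1 then pvBump B (p.1 - q.1) (w p.1 q.1 q.2) else B) B) B).length
      = B.length := by
  induction rows with
  | nil => intro r0 B; simp [PySem.List.enumerate_nil]
  | cons row rest ih =>
      intro r0 B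
      rw [PySem.List.enumerate_cons, List.foldl_cons, ih, pv_inner_len]

theorem pv_outer {β : Type} (w : Int → Int → String → β) (rows : List (List String)) :
    ∀ (r0 : Nat) (B : List (List β)) (j : Nat), j < B.length →
    ((PySem.List.enumerate rows (r0 : Int)).foldl
      (fun B p => (PySem.List.enumerate p.2 (0 : Int)).foldl
        (fun B q => if 0 ≤ p.1 - q.1 then pvBump B (p.1 - q.1) (w p.1 q.1 q.2) else B) B) B).getD j []
    = B.getD j [] ++ pvDiags (fun r c ch => w (r : Int) (c : Int) ch) j rows r0 := by
  induction rows with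
  | nil => intro r0 B j hj; simp [PySem.List.enumerate_nil, pvDiags]
  | cons row rest ih =>
      intro r0 B j hj
      rw [PySem.List.enumerate_cons, List.foldl_cons]
      simp only []
      have hcast : (r0 : Int) + 1 = ((r0 + 1 : Nat) : Int) := by push_cast; ring
      rw [hcast]
      have hlen := pv_inner_len (fun c ch => w (r0 : Int) c ch) (r0 : Int) row (0 : Int) B
      simp only [] at hlen
      rw [ih (r0 + 1) _ j (by rw [hlen]; exact hj)]
      have hin := pv_inner (fun c ch => w (r0 : Int) c ch) r0 row 0 B j hj
      simp only [] at hin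
      rw [Nat.cast_zero] at hin
      rw [hin, List.append_assoc]
      congr 1
      show _ = pvDiags (fun r c ch => w (r : Int) (c : Int) ch) j (row :: rest) r0
      rw [pvDiags]
      congr 1
      by_cases hc : j ≤ r0 ∧ r0 - j < row.length
      · have hc' : 0 + j ≤ r0 ∧ r0 - 0 - j < row.length := by omega
        rw [if_pos hc', if_pos hc]
        have h1 : ((r0 : Int) - (j : Int)) = ((r0 - j : Nat) : Int) := by omega
        have h2 : r0 - j - 0 = r0 - j := by omega
        rw [h1, h2]
      · rw [if_neg (by omega), if_neg hc]

-- under Pre_ (each remaining row is long enough) the contributions to diagonal j are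
-- exactly the cells (r, r - j) for r from max j r0 to the end
theorem pvDiags_spec {β : Type} (v : Nat → Nat → String → β) (j : Nat) :
    ∀ (rows : List (List String)) (r0 : Nat),
    (∀ k < rows.length, r0 + k < (rows.getD k []).length) →
    pvDiags v j rows r0 = (List.range (r0 + rows.length - max j r0)).map
      (fun k => v (max j r0 + k) (max j r0 + k - j)
        ((rows.getD (max j r0 - r0 + k) []).getD (max j r0 + k - j) "")) := by
  intro rows
  induction rows with
  | nil => intro r0 h; simp [pvDiags]
  | cons row rest ih =>
      intro r0 h
      have htail : ∀ k < rest.length, (r0 + 1) + k < (rest.getD k []).length := by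
        intro k hk
        have h2 := h (k + 1) (by simp; omega)
        have e : (row :: rest).getD (k + 1) ([] : List String) = rest.getD k [] := rfl
        rw [e] at h2
        omega
      rw [pvDiags]
      by_cases hjr : j ≤ r0
      · -- contributing phase: the head row contributes the cell (r0, r0 - j)
        have hrow : r0 < row.length := by
          have h0 := h 0 (by simp)
          simpa using h0
        rw [if_pos ⟨hjr, by omega⟩, ih (r0 + 1) htail]
        have hmax : max j r0 = r0 := by omega
        have hmax' : max j (r0 + 1) = r0 + 1 := by omega
        rw [hmax, hmax']
        have hL : r0 + (row :: rest).length - r0 = rest.length + 1 := by simp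
        have hL' : r0 + 1 + rest.length - (r0 + 1) = rest.length := by omega
        rw [hL, hL', List.range_succ_eq_map, List.map_cons, List.map_map,
            List.singleton_append]
        congr 1
        · have e0 : r0 - r0 + 0 = 0 := by omega
          have e1 : r0 + 0 = r0 := by omega
          rw [e0, e1]
          rfl
        · apply List.map_congr_left
          intro k hk
          simp only [Function.comp_apply]
          have e1 : r0 + (k + 1) = r0 + 1 + k := by omega
          have e2 : r0 - r0 + (k + 1) = k + 1 := by omega
          have e3 : r0 + 1 - (r0 + 1) + k = k := by omega
          rw [e1, e2, e3]
          rfl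
      · -- skipping phase: r0 < j, the head row is above diagonal j
        rw [if_neg (by omega), ih (r0 + 1) htail]
        have hmax : max j r0 = j := by omega
        have hmax' : max j (r0 + 1) = j := by omega
        rw [hmax, hmax']
        have hL : r0 + 1 + rest.length - j = r0 + (row :: rest).length - j := by
          simp; omega
        rw [hL]
        apply List.map_congr_left
        intro k hk
        have e : j - r0 + k = (j - (r0 + 1) + k) + 1 := by omega
        rw [e]
        rfl

-- ---- splitting the paired fold into its two components ----

theorem pv_foldl_if_pair {α β γ : Type} (l : List α) (p : α → Prop) [DecidablePred p]
    (f : β → α → β) (g : γ → α → γ) :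
    ∀ (b : β) (c : γ),
    l.foldl (fun st x => if p x then (f st.1 x, g st.2 x) else st) (b, c)
    = (l.foldl (fun s x => if p x then f s x else s) b,
       l.foldl (fun s x => if p x then g s x else s) c) := by
  induction l with
  | nil => intro b c; rfl
  | cons hd tl ih =>
      intro b c
      simp only [List.foldl_cons]
      by_cases h : p hd
      · rw [if_pos h, if_pos h, if_pos h]; exact ih _ _
      · rw [if_neg h, if_neg h, if_neg h]; exact ih _ _

-- ---- A side: each comprehension over enumerate(array) is a map over a plain range ----

theorem pvA_list {β : Type} (array : List (List String)) (F : Int → β) (x : Nat)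
    (hx : x ≤ array.length) :
    (PySem.List.enumerate array 0).foldl
      (fun acc p => if 0 ≤ p.1 + (x : Int) ∧ p.1 + (x : Int) < (array.length : Int)
        then acc ++ [F p.1] else acc) []
    = (List.range (array.length - x)).map (fun (k : Nat) => F (k : Int)) := by
  rw [PySem.List.enumerate_eq_map_pyRange (d := []), List.foldl_map]
  rw [PySem.List.foldl_append_ite
    (p := fun j => 0 ≤ j + (x : Int) ∧ j + (x : Int) < (array.length : Int))
    (f := fun j => F j)]
  rw [List.nil_append]
  simp only [PySem.List.len_eq]
  have hsplit : PySem.List.pyRange 0 (array.length : Int) 1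
      = PySem.List.pyRange 0 ((array.length : Int) - (x : Int)) 1
        ++ PySem.List.pyRange ((array.length : Int) - (x : Int)) (array.length : Int) 1 := by
    exact PySem.List.pyRange_one_append _ _ _ (by omega) (by omega)
  rw [hsplit, List.filter_append]
  have h1 : (PySem.List.pyRange 0 ((array.length : Int) - (x : Int)) 1).filter
      (fun j => decide (0 ≤ j + (x : Int) ∧ j + (x : Int) < (array.length : Int)))
      = PySem.List.pyRange 0 ((array.length : Int) - (x : Int)) 1 := by
    apply List.filter_eq_self.2
    intro j hj
    rw [PySem.List.mem_pyRange_one] at hj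
    simp only [decide_eq_true_eq]
    omega
  have h2 : (PySem.List.pyRange ((array.length : Int) - (x : Int)) (array.length : Int) 1).filter
      (fun j => decide (0 ≤ j + (x : Int) ∧ j + (x : Int) < (array.length : Int)))
      = [] := by
    apply List.filter_eq_nil_iff.2
    intro j hj
    rw [PySem.List.mem_pyRange_one] at hj
    simp only [decide_eq_true_eq]
    omega
  rw [h1, h2, List.append_nil, PySem.List.pyRange_one, List.map_map]
  have hn : (((array.length : Int) - (x : Int)) - 0).toNat = array.length - x := by omega
  rw [hn]
  apply List.map_congr_left
  intro k hk
  simp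

-- "".join with empty separator is flatten
theorem pv_join_empty : ∀ (l : List (List Char)), PySem.Chars.join [] l = l.flatten
  | [] => by simp [PySem.Chars.join_nil]
  | [a] => by simp [PySem.Chars.join_singleton]
  | a :: b :: r => by
      rw [PySem.Chars.join_cons_cons, pv_join_empty (b :: r)]
      simp

-- stringify is exactly "".join
theorem stringify_eq_join (l : List String) : stringify l = PySem.Str.join "" l := by
  unfold stringify PySem.Str.join
  rw [PySem.List.foldl_pyRange_zero_pyGetD' l "" (fun acc s => acc ++ s.toList) []]
  rw [PySem.List.foldl_append_eq_flatMap, List.nil_append]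
  congr 1
  rw [show ("" : String).toList = [] from rfl, pv_join_empty]
  simp [List.flatMap_def]

-- A's result in closed form (no precondition needed: pyGetD is total)
theorem methodTwo_eq (array : List (List String)) :
    methodTwo array =
      ((List.range array.length).map (fun (x : Nat) =>
          stringify ((List.range (array.length - x)).map (fun (k : Nat) => pvCell array (x + k) k))),
       (List.range array.length).map (fun (x : Nat) =>
          (List.range (array.length - x)).map (fun (k : Nat) => ((k : Int) + 1, (x : Int) + k + 1)))) := by
  unfold methodTwo
  rw [PySem.List.foldl_prod_mk
    (f := fun (s : List String) (x : Int) => s ++ [stringify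
        ((PySem.List.enumerate array 0).foldl (fun acc p =>
          if 0 ≤ p.1 + x ∧ p.1 + x < (array.length : Int) then
            acc ++ [PySem.List.pyGetD (PySem.List.pyGetD array (x + p.1) []) p.1 ""]
          else acc) [])])
    (g := fun (s : List (List (Int × Int))) (x : Int) => s ++ [(PySem.List.enumerate array 0).foldl (fun acc p =>
          if 0 ≤ p.1 + x ∧ p.1 + x < (array.length : Int) then
            acc ++ [((p.1 + 1 : Int), (x + p.1 + 1 : Int))]
          else acc) []])]
  rw [PySem.List.foldl_append_singleton_eq_map, PySem.List.foldl_append_singleton_eq_map]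
  rw [List.nil_append, List.nil_append]
  rw [PySem.List.pyRange_one, List.map_map, List.map_map]
  have hn : ((array.length : Int) - 0).toNat = array.length := by omega
  rw [hn]
  refine Prod.ext ?_ ?_
  · simp only []
    apply List.map_congr_left
    intro x hx
    have hx' : x ≤ array.length := le_of_lt (List.mem_range.1 hx)
    simp only [Function.comp_apply, zero_add]
    have hA := pvA_list array
      (fun i => PySem.List.pyGetD (PySem.List.pyGetD array ((x : Int) + i) []) i "") x hx'
    simp only [] at hA
    rw [hA]
    congr 1
    apply List.map_congr_left
    intro k hk
    have e : (x : Int) + (k : Nat) = ((x + k : Nat) : Int) := by push_cast; ring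
    rw [e, PySem.List.pyGetD_natCast, PySem.List.pyGetD_natCast]
    rfl
  · simp only []
    apply List.map_congr_left
    intro x hx
    have hx' : x ≤ array.length := le_of_lt (List.mem_range.1 hx)
    simp only [Function.comp_apply, zero_add]
    have hA := pvA_list array
      (fun i => ((i + 1 : Int), ((x : Int) + i + 1 : Int))) x hx'
    simp only [] at hA
    rw [hA]

-- B's buckets in closed form, under Pre_ (generic in the bucketed value)
theorem pv_buckets {β : Type} (w : Int → Int → String → β) (array : List (List String))
    (h : Pre_methodTwo array) :
    (PySem.List.enumerate array 0).foldl
      (fun s p => (PySem.List.enumerate p.2 0).foldl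
        (fun s q => if 0 ≤ p.1 - q.1 then pvBump s (p.1 - q.1) (w p.1 q.1 q.2) else s) s)
      (List.replicate array.length [])
    = (List.range array.length).map (fun (x : Nat) =>
        (List.range (array.length - x)).map (fun (k : Nat) =>
          w ((x + k : Nat) : Int) ((k : Nat) : Int) (pvCell array (x + k) k))) := by
  have hpre : ∀ k < array.length, 0 + k < (array.getD k []).length := by
    intro k hk
    have := h k hk
    omega
  have hlen := pv_outer_len w array 0 (List.replicate array.length [])
  rw [List.length_replicate] at hlen
  apply List.ext_getElem
  · rw [hlen]
    simp
  · intro i h1 h2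
    have hi : i < array.length := by rw [hlen] at h1; exact h1
    rw [List.getElem_map, List.getElem_range]
    have hout := pv_outer w array 0 (List.replicate array.length []) i (by simpa using hi)
    rw [Nat.cast_zero] at hout
    rw [← List.getD_eq_getElem _ ([] : List β) h1, hout]
    have hrep : (List.replicate array.length ([] : List β)).getD i [] = [] := by
      simp [List.getD_eq_getElem?_getD, hi]
    rw [hrep, List.nil_append, pvDiags_spec _ _ _ 0 hpre]
    have eL : 0 + array.length - max i 0 = array.length - i := by omega
    rw [eL]
    apply List.map_congr_left
    intro k hk
    have e1 : max i 0 - 0 + k = i + k := by omega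
    have e2 : max i 0 + k - i = k := by omega
    have e3 : max i 0 + k = i + k := by omega
    rw [e1, e2, e3]
    rfl

-- B's result in closed form, under Pre_
theorem methodTwo_alt_eq (array : List (List String)) (h : Pre_methodTwo array) :
    methodTwo_alt array =
      ((List.range array.length).map (fun (x : Nat) =>
          PySem.Str.join "" ((List.range (array.length - x)).map (fun (k : Nat) => pvCell array (x + k) k))),
       (List.range array.length).map (fun (x : Nat) =>
          (List.range (array.length - x)).map (fun (k : Nat) => ((k : Int) + 1, (x : Int) + k + 1)))) := by
  unfold methodTwo_alt
  have hbody : (fun (st : List (List String) × List (List (Int × Int))) (p : Int × List String) =>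
      (PySem.List.enumerate p.2 0).foldl
        (fun (st : List (List String) × List (List (Int × Int))) q =>
          if 0 ≤ p.1 - q.1 then
            (pvBump st.1 (p.1 - q.1) q.2, pvBump st.2 (p.1 - q.1) (q.1 + 1, p.1 + 1))
          else st) st)
    = (fun st p =>
        ((PySem.List.enumerate p.2 0).foldl
            (fun s q => if 0 ≤ p.1 - q.1 then pvBump s (p.1 - q.1) q.2 else s) st.1,
         (PySem.List.enumerate p.2 0).foldl
            (fun s q => if 0 ≤ p.1 - q.1 then pvBump s (p.1 - q.1) (q.1 + 1, p.1 + 1) else s) st.2)) := by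
    funext st p
    obtain ⟨b, c⟩ := st
    exact pv_foldl_if_pair (PySem.List.enumerate p.2 0) (fun q => 0 ≤ p.1 - q.1)
      (fun s q => pvBump s (p.1 - q.1) q.2)
      (fun s q => pvBump s (p.1 - q.1) (q.1 + 1, p.1 + 1)) b c
  rw [hbody]
  rw [PySem.List.foldl_prod_mk
    (f := fun (s : List (List String)) (p : Int × List String) =>
      (PySem.List.enumerate p.2 0).foldl
        (fun s q => if 0 ≤ p.1 - q.1 then pvBump s (p.1 - q.1) q.2 else s) s)
    (g := fun (s : List (List (Int × Int))) (p : Int × List String) =>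
      (PySem.List.enumerate p.2 0).foldl
        (fun s q => if 0 ≤ p.1 - q.1 then pvBump s (p.1 - q.1) (q.1 + 1, p.1 + 1) else s) s)]
  have hB1 := pv_buckets (fun _ _ ch => ch) array h
  simp only [] at hB1
  have hB2 := pv_buckets (fun r c _ => ((c + 1 : Int), (r + 1 : Int))) array h
  simp only [] at hB2
  refine Prod.ext ?_ ?_
  · simp only []
    rw [hB1, List.map_map]
    rfl
  · simp only []
    rw [hB2]
    apply List.map_congr_left
    intro x hx
    apply List.map_congr_left
    intro k hk
    have e : ((x + k : Nat) : Int) + 1 = (x : Int) + k + 1 := by push_cast; ring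
    rw [e]

-- ===== VERDICT (by name: the statement is the Claim_ definition above) =====
theorem methodTwo_spec : Claim_equal_methodTwo := by
  intro array _ hpre
  unfold Spec_methodTwo
  rw [methodTwo_eq, methodTwo_alt_eq array hpre]
  refine Prod.ext ?_ rfl
  simp only []
  apply List.map_congr_left
  intro x hx
  rw [stringify_eq_join]
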